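-- pv_equiv track=rewrite | github.com/sakinayawarali/Agentflo-YTL | agents/tools/sales_intelligence_engine.py | _objective_from_intent
-- ===== SOURCE A (Python) =====
-- from typing import List, Optional, Dict, Any
--
-- OBJECTIVE_RECOMMENDATION = "RECOMMENDATION"
--
-- OBJECTIVE_BUDGET = "BUDGET_RECOMMENDATION"
--
-- OBJECTIVE_PROMOS_ONLY = "PROMOTIONS_ONLY"
--
-- OBJECTIVE_CART_ITEMS = "CART_ITEMS"
--
-- OBJECTIVE_REORDER = "REORDER_INTELLIGENCE"
--
-- def _objective_from_intent(intent_text: Optional[str]) -> Optional[str]: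
--     """
--     Lightweight intent router to keep the tool resilient even if the agent
--     sends only a hint instead of an explicit objective.
--     """
--     if not intent_text:
--         return None
--     text = intent_text.lower()
--
--     if any(keyword in text for keyword in ["promo", "promotion", "offer", "offers", "scheme", "deal", "discount"]):
--         return OBJECTIVE_PROMOS_ONLY
--
--     if any(keyword in text for keyword in ["budget", "under", "cap", "limit", "save", "savings"]):
--         return OBJECTIVE_BUDGET
--
--     if any(keyword in text for keyword in ["cart", "already selected", "existing cart"]):
--         return OBJECTIVE_CART_ITEMS
--
--     if any(keyword in text for keyword in ["reorder", "last order", "repeat order", "order history"]):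
--         return OBJECTIVE_REORDER
--
--     if "recommend" in text or "suggest" in text:
--         return OBJECTIVE_RECOMMENDATION
--
--     return None
-- ===== SOURCE B (Python) =====
-- # B: single-pass min-rank aggregation over a flat keyword->rank map (no ordered if-chain, no early return).
-- OBJECTIVE_RECOMMENDATION = "RECOMMENDATION"
-- OBJECTIVE_BUDGET = "BUDGET_RECOMMENDATION"
-- OBJECTIVE_PROMOS_ONLY = "PROMOTIONS_ONLY"
-- OBJECTIVE_CART_ITEMS = "CART_ITEMS"
-- OBJECTIVE_REORDER = "REORDER_INTELLIGENCE"
--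
-- OBJECTIVES = [OBJECTIVE_PROMOS_ONLY, OBJECTIVE_BUDGET, OBJECTIVE_CART_ITEMS,
--               OBJECTIVE_REORDER, OBJECTIVE_RECOMMENDATION]
--
-- KEYWORD_GROUPS = [
--     ["promo", "promotion", "offer", "offers", "scheme", "deal", "discount"],
--     ["budget", "under", "cap", "limit", "save", "savings"],
--     ["cart", "already selected", "existing cart"],
--     ["reorder", "last order", "repeat order", "order history"],
--     ["recommend", "suggest"],
-- ]
--
-- # flat keyword -> priority rank (lower rank = higher priority)
-- KEYWORD_RANK = {kw: r for r, kws in enumerate(KEYWORD_GROUPS) for kw in kws}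
--
-- def _objective_from_intent(intent_text):
--     if not intent_text:
--         return None
--     text = intent_text.lower()
--     best = len(OBJECTIVES)
--     for kw, rank in KEYWORD_RANK.items():
--         if rank < best and kw in text:
--             best = rank
--     return OBJECTIVES[best] if best < len(OBJECTIVES) else None
-- ===== Notes on version B (the rewrite author's own statement) =====
-- stated objective: alternative
-- what changed: Replaces the ordered chain of five any()-guarded if-blocks (early return on first matching group) with a flat keyword->priority-rank dict scanned in one pass keeping the minimum matched rank, then indexing the objective table by that rank.
import Mathlib
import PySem

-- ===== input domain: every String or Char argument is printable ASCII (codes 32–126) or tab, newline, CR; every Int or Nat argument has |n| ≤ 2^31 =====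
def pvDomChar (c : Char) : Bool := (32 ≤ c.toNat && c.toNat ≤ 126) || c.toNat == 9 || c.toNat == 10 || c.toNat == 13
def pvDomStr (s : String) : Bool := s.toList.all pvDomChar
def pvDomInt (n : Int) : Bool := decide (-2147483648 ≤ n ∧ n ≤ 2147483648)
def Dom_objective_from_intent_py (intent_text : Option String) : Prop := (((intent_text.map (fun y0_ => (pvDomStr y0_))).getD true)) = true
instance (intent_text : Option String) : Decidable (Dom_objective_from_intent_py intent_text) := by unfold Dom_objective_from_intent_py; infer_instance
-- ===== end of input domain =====

-- B replaces A's ordered if-chain with a flat keyword->rank map folded once keeping the minimum matched rank; same cost, different aggregation.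
-- ===== PORT A =====
def objective_from_intent_py (intent_text : Option String) : Option String :=
  match intent_text with
  | none => none
  | some s =>
    if s = "" then none
    else
      let text := PySem.Str.lower s
      if ["promo", "promotion", "offer", "offers", "scheme", "deal", "discount"].any (fun k => PySem.Str.isIn k text) then
        some "PROMOTIONS_ONLY"
      else if ["budget", "under", "cap", "limit", "save", "savings"].any (fun k => PySem.Str.isIn k text) then
        some "BUDGET_RECOMMENDATION"
      else if ["cart", "already selected", "existing cart"].any (fun k => PySem.Str.isIn k text) then
        some "CART_ITEMS"
      else if ["reorder", "last order", "repeat order", "order history"].any (fun k => PySem.Str.isIn k text) then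
        some "REORDER_INTELLIGENCE"
      else if PySem.Str.isIn "recommend" text || PySem.Str.isIn "suggest" text then
        some "RECOMMENDATION"
      else none

-- ===== PORT B =====
def objectivesB : List String :=
  ["PROMOTIONS_ONLY", "BUDGET_RECOMMENDATION", "CART_ITEMS", "REORDER_INTELLIGENCE", "RECOMMENDATION"]

def keywordGroupsB : List (List String) :=
  [ ["promo", "promotion", "offer", "offers", "scheme", "deal", "discount"],
    ["budget", "under", "cap", "limit", "save", "savings"],
    ["cart", "already selected", "existing cart"],
    ["reorder", "last order", "repeat order", "order history"],
    ["recommend", "suggest"] ]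

-- flat keyword -> rank map ({kw: r for r, kws in enumerate(KEYWORD_GROUPS) for kw in kws})
def keywordRankB : List (String × Int) :=
  (PySem.List.enumerate keywordGroupsB).flatMap (fun rk => rk.2.map (fun kw => (kw, rk.1)))

def objective_from_intent_py_alt (intent_text : Option String) : Option String :=
  match intent_text with
  | none => none
  | some s =>
    if s = "" then none
    else
      let text := PySem.Str.lower s
      let best := keywordRankB.foldl
        (fun b kr => if kr.2 < b && PySem.Str.isIn kr.1 text then kr.2 else b)
        (objectivesB.length : Int)
      if best < (objectivesB.length : Int) then PySem.List.pyGet? objectivesB best else none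

-- ===== PRECONDITION & SPEC =====
def Spec_objective_from_intent_py (intent_text : Option String) (out : Option String) : Prop := out = objective_from_intent_py_alt intent_text
instance (intent_text : Option String) (out : Option String) : Decidable (Spec_objective_from_intent_py intent_text out) := by unfold Spec_objective_from_intent_py; infer_instance

-- ===== CLAIM (what is proved, stated in full; the proofs are below) =====
def Claim_equal_objective_from_intent_py : Prop := ∀ (intent_text : Option String), Dom_objective_from_intent_py intent_text → Spec_objective_from_intent_py intent_text (objective_from_intent_py intent_text)

-- ===== LEMMAS AND PROOFS =====

-- folding a keyword group whose entries all carry the same rank r updates the running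
-- minimum to r exactly when some keyword matches (p) and r improves on the accumulator
theorem groupFold_eq (t : String) (kws : List String) (r b : Int) :
    ((kws.map (fun k => (k, r))).foldl
        (fun b kr => if kr.2 < b && PySem.Str.isIn kr.1 t then kr.2 else b) b)
      = if kws.any (fun k => PySem.Str.isIn k t) && decide (r < b) then r else b := by
  induction kws generalizing b with
  | nil => simp
  | cons k ks ih =>
    simp only [List.map_cons, List.foldl_cons, List.any_cons, ih]
    by_cases hm : PySem.Str.isIn k t = true
    · simp only [PySem.Str.isIn_eq] at hm
      by_cases hr : r < b
      · simp [hm, hr]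
      · simp [hm, hr]
    · simp only [Bool.not_eq_true, PySem.Str.isIn_eq] at hm
      simp [hm]

-- ===== VERDICT (by name: the statement is the Claim_ definition above) =====
set_option maxHeartbeats 1000000 in
theorem objective_from_intent_py_spec : Claim_equal_objective_from_intent_py := by
  intro intent_text _
  unfold Spec_objective_from_intent_py objective_from_intent_py objective_from_intent_py_alt
  cases intent_text with
  | none => rfl
  | some s =>
    by_cases h : s = ""
    · simp [h]
    · simp only [h, if_false]
      have hflat : keywordRankB
          = (["promo", "promotion", "offer", "offers", "scheme", "deal", "discount"].map (fun k => (k, (0 : Int))))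
            ++ (["budget", "under", "cap", "limit", "save", "savings"].map (fun k => (k, (1 : Int))))
            ++ (["cart", "already selected", "existing cart"].map (fun k => (k, (2 : Int))))
            ++ (["reorder", "last order", "repeat order", "order history"].map (fun k => (k, (3 : Int))))
            ++ (["recommend", "suggest"].map (fun k => (k, (4 : Int)))) := by
        simp [keywordRankB, keywordGroupsB, PySem.List.enumerate_cons, PySem.List.enumerate_nil]
      simp only [hflat, List.foldl_append, groupFold_eq]
      set t := PySem.Str.lower s with ht
      have h5 : (["recommend", "suggest"].any (fun k => PySem.Str.isIn k t))
          = (PySem.Str.isIn "recommend" t || PySem.Str.isIn "suggest" t) := by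
        simp [List.any_cons, List.any_nil]
      rw [h5]
      generalize (["promo", "promotion", "offer", "offers", "scheme", "deal", "discount"].any
          (fun k => PySem.Str.isIn k t)) = g1
      generalize (["budget", "under", "cap", "limit", "save", "savings"].any
          (fun k => PySem.Str.isIn k t)) = g2
      generalize (["cart", "already selected", "existing cart"].any
          (fun k => PySem.Str.isIn k t)) = g3
      generalize (["reorder", "last order", "repeat order", "order history"].any
          (fun k => PySem.Str.isIn k t)) = g4
      generalize (PySem.Str.isIn "recommend" t) = g5a
      generalize (PySem.Str.isIn "suggest" t) = g5b
      revert g1 g2 g3 g4 g5a g5b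
      decide
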